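-- pv_equiv track=rewrite | github.com/Belopyckich/Pycommander | main_window.py | checknullpath
-- ===== SOURCE A (Python) =====
-- def checknullpath(spis):
--     tempspis = []
--     i = 0
--     while i < len(spis):
--         if spis[i] != '':
--             tempspis.append(spis[i])
--             del spis[i]
--         else:
--             i += 1
--     spis = tempspis
--     return spis
-- ===== SOURCE B (Python) =====
-- def checknullpath(spis):
--     # One-pass partition: collect non-empty strings; reproduce A's in-place
--     # effect by leaving only the empty strings in the input list.
--     res = [x for x in spis if x != '']
--     spis[:] = [x for x in spis if x == '']
--     return res
-- ===== Notes on version B (the rewrite author's own statement) =====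
-- stated objective: faster
-- what changed: Replaced the O(n^2) while-loop that deletes non-empty elements one by one (each del shifting the tail) with a single-pass filter comprehension (plus an in-place reassignment leaving the empty strings, matching A's mutation of the argument).
import Mathlib
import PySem

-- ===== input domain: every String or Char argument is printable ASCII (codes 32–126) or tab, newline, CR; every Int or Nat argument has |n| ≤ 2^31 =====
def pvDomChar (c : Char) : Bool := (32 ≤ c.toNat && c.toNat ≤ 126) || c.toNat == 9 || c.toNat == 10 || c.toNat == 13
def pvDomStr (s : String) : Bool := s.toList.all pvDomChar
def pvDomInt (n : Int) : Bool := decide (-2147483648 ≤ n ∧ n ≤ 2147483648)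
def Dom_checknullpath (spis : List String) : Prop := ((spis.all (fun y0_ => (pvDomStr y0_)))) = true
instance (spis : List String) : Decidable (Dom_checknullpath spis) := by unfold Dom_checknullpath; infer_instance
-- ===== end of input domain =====

-- ===== PORT A =====
-- while loop of A: index i over spis; non-empty element → append to tempspis and delete
-- at i (list shrinks); empty → i += 1. Terminates since spis.length - i decreases.
def checknullpathLoop (spis : List String) (tempspis : List String) (i : Nat) : List String :=
  if h : i < spis.length then
    if spis[i] != "" then
      checknullpathLoop (spis.eraseIdx i) (tempspis ++ [spis[i]]) i
    else
      checknullpathLoop spis tempspis (i + 1)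
  else
    tempspis
termination_by spis.length - i
decreasing_by
  · have := List.length_eraseIdx_of_lt h; omega
  · omega

def checknullpath (spis : List String) : List String :=
  checknullpathLoop spis [] 0

-- ===== PORT B =====
-- B: one-pass filter comprehension (return value; Source B's mutation of the argument is a side effect only)
def checknullpath_alt (spis : List String) : List String :=
  spis.filter (fun x => x != "")

-- ===== PRECONDITION & SPEC =====
def Spec_checknullpath (spis : List String) (out : List String) : Prop := out = checknullpath_alt spis
instance (spis : List String) (out : List String) : Decidable (Spec_checknullpath spis out) := by unfold Spec_checknullpath; infer_instance

-- ===== CLAIM (what is proved, stated in full; the proofs are below) =====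
def Claim_equal_checknullpath : Prop := ∀ (spis : List String), Dom_checknullpath spis → Spec_checknullpath spis (checknullpath spis)

-- ===== LEMMAS AND PROOFS =====

-- ===== VERDICT (by name: the statement is the Claim_ definition above) =====
-- loop invariant: the while loop returns tempspis ++ the non-empty elements of spis.drop i
theorem checknullpathLoop_eq (spis tempspis : List String) (i : Nat) :
    checknullpathLoop spis tempspis i
      = tempspis ++ (spis.drop i).filter (fun x => x != "") := by
  induction spis, tempspis, i using checknullpathLoop.induct with
  | case1 spis tempspis i h hne ih =>
      rw [checknullpathLoop]
      simp only [h, dite_true, hne, if_pos]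
      rw [ih]
      have hd : spis.drop i = spis[i] :: spis.drop (i + 1) :=
        List.drop_eq_getElem_cons h
      have he : (spis.eraseIdx i).drop i = spis.drop (i + 1) := by
        rw [List.eraseIdx_eq_take_drop_succ,
          List.drop_append_of_le_length (by simp [Nat.le_of_lt h])]
        simp
      rw [he, hd, List.filter_cons, hne]
      simp
  | case2 spis tempspis i h hne ih =>
      rw [checknullpathLoop]
      simp only [h, dite_true, hne]
      rw [ih]
      have hd : spis.drop i = spis[i] :: spis.drop (i + 1) :=
        List.drop_eq_getElem_cons h
      rw [hd, List.filter_cons]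
      simp only [Bool.not_eq_true] at hne
      simp [hne]
  | case3 spis tempspis i h =>
      rw [checknullpathLoop]
      simp only [h, dite_false]
      rw [List.drop_eq_nil_of_le (Nat.le_of_not_lt h)]
      simp

theorem checknullpath_spec : Claim_equal_checknullpath := by
  intro spis _
  unfold Spec_checknullpath checknullpath checknullpath_alt
  simpa using checknullpathLoop_eq spis [] 0
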